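-- pv_equiv track=rewrite | github.com/cispa/RISCover | pyutils/riscv/riscv_opcodes_to_instruction_collection.py | split_encoding_str
-- ===== SOURCE A (Python) =====
-- def split_encoding_str(encoding: str):
--     # E.g. '101011010111-----000-----1110111'
--     # result: [(0, '1110111'), (12, '000'), ...]
--     encodings = []
--     current = ""
--     current_start = 0
--     for i, e in enumerate(reversed(encoding)):
--         if e == '-':
--             if current:
--                 encodings += [(current_start, current)]
--                 current = ""
--         else:
--             if current:
--                 current = e + current
--             else:
--                 current_start = i
--                 current = e
--
--     if current:
--         encodings += [(current_start, current)]
--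
--     return encodings
-- ===== SOURCE B (Python) =====
-- def split_encoding_str(encoding: str):
--     # Split the reversed string on '-' and walk the parts with a running offset.
--     rev = encoding[::-1]
--     res = []
--     pos = 0
--     for part in rev.split('-'):
--         if part:
--             res.append((pos, part[::-1]))
--         pos += len(part) + 1
--     return res
-- ===== Notes on version B (the rewrite author's own statement) =====
-- stated objective: faster
-- what changed: Replaces the hand-rolled character-by-character run-tracking state machine (which grows each run by string prepending and appends via list concatenation, both quadratic) by reversing the string once, splitting it on the dash separator, and scanning the parts with a running offset.
import Mathlib
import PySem

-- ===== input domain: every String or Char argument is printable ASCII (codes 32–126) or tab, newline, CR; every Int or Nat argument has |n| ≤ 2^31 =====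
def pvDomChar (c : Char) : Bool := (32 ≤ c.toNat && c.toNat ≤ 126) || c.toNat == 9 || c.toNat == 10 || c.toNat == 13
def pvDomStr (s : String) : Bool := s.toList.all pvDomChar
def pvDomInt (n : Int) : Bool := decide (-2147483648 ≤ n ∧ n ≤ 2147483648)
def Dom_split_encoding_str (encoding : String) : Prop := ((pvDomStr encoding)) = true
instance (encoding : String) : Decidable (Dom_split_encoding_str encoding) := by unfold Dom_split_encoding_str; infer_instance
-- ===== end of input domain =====

-- B replaces A's hand-rolled run-tracking state machine (quadratic string prepending)
-- by a split of the reversed string on the dash plus a running-offset scan of the parts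
-- (objective: faster; measured faster in a timing run).

-- ===== PORT A =====
-- state = (encodings, current, current_start); current is the run's chars in original order (List Char, emitted via String.ofList)
def pvAStep (st : List (Int × String) × List Char × Int) (ie : Int × Char) :
    List (Int × String) × List Char × Int :=
  let (encodings, current, current_start) := st
  let (i, e) := ie
  if e = '-' then
    if current ≠ [] then (encodings ++ [(current_start, String.ofList current)], [], current_start)
    else st
  else
    if current ≠ [] then (encodings, e :: current, current_start)
    else (encodings, [e], i)

def split_encoding_str (encoding : String) : List (Int × String) :=
  let st := (PySem.List.enumerate (String.toList encoding).reverse).foldl pvAStep ([], [], 0)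
  if st.2.1 ≠ [] then st.1 ++ [(st.2.2, String.ofList st.2.1)] else st.1

-- ===== PORT B =====
def split_encoding_str_alt (encoding : String) : List (Int × String) :=
  let rev := (String.toList encoding).reverse  -- encoding[::-1]
  let st := (PySem.Chars.splitOn rev ['-']).foldl
    (fun (st : List (Int × String) × Int) part =>
      ((if part ≠ [] then st.1 ++ [(st.2, String.ofList part.reverse)] else st.1),
       st.2 + part.length + 1))
    ([], 0)
  st.1

-- ===== PRECONDITION & SPEC =====
def Spec_split_encoding_str (encoding : String) (out : List (Int × String)) : Prop := out = split_encoding_str_alt encoding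
instance (encoding : String) (out : List (Int × String)) : Decidable (Spec_split_encoding_str encoding out) := by unfold Spec_split_encoding_str; infer_instance

-- ===== CLAIM (what is proved, stated in full; the proofs are below) =====
def Claim_equal_split_encoding_str : Prop := ∀ (encoding : String), Dom_split_encoding_str encoding → Spec_split_encoding_str encoding (split_encoding_str encoding)

-- ===== LEMMAS AND PROOFS =====

-- simple structural single-char split used as the common spec
def pvSplit : List Char → List (List Char)
  | [] => [[]]
  | c :: cs =>
    if c = '-' then [] :: pvSplit cs
    else
      match pvSplit cs with
      | h :: t => (c :: h) :: t
      | [] => [[c]]  -- unreachable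

theorem pvSplit_ne_nil (l : List Char) : pvSplit l ≠ [] := by
  cases l with
  | nil => simp [pvSplit]
  | cons c cs =>
    simp only [pvSplit]
    split
    · simp
    · split <;> simp

theorem splitOn_go_eq (fuel : Nat) :
    ∀ (l cur : List Char) (acc : List (List Char)), l.length < fuel →
      PySem.Chars.splitOn.go ['-'] fuel l cur acc =
        acc.reverse ++ ((pvSplit l).modifyHead (cur.reverse ++ ·)) := by
  induction fuel with
  | zero => intro l cur acc h; omega
  | succ n ih =>
    intro l cur acc h
    cases l with
    | nil => simp [PySem.Chars.splitOn.go, pvSplit]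
    | cons c cs =>
      by_cases hc : c = '-'
      · subst hc
        rw [show PySem.Chars.splitOn.go ['-'] (n+1) ('-' :: cs) cur acc
              = PySem.Chars.splitOn.go ['-'] n cs [] (cur.reverse :: acc) by
            simp [PySem.Chars.splitOn.go, List.isPrefixOf]]
        rw [ih cs [] (cur.reverse :: acc) (by simpa using Nat.lt_of_succ_lt_succ h)]
        simp [pvSplit, List.modifyHead]
        cases pvSplit cs <;> rfl
      · rw [show PySem.Chars.splitOn.go ['-'] (n+1) (c :: cs) cur acc
              = PySem.Chars.splitOn.go ['-'] n cs (c :: cur) acc by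
            simp [PySem.Chars.splitOn.go, List.isPrefixOf, beq_iff_eq, Ne.symm hc]]
        rw [ih cs (c :: cur) acc (by simpa using Nat.lt_of_succ_lt_succ h)]
        simp only [pvSplit, if_neg hc]
        rcases hs : pvSplit cs with _ | ⟨h1, t1⟩
        · exact absurd hs (pvSplit_ne_nil cs)
        · simp

theorem splitOn_eq_pvSplit (l : List Char) :
    PySem.Chars.splitOn l ['-'] = pvSplit l := by
  have h1 := splitOn_go_eq (l.length + 1) l [] [] (by omega)
  have h2 : List.modifyHead (fun x : List Char => x) (pvSplit l) = pvSplit l := by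
    cases pvSplit l <;> rfl
  simpa [PySem.Chars.splitOn, h2] using h1

-- B's parts scan, accumulator-free form
def pvBfold : List (List Char) → Int → List (Int × String)
  | [], _ => []
  | p :: ps, pos =>
    (if p ≠ [] then [(pos, String.ofList p.reverse)] else []) ++ pvBfold ps (pos + p.length + 1)

theorem bfold_foldl (parts : List (List Char)) :
    ∀ (res : List (Int × String)) (pos : Int),
      (parts.foldl
        (fun (st : List (Int × String) × Int) part =>
          ((if part ≠ [] then st.1 ++ [(st.2, String.ofList part.reverse)] else st.1),
           st.2 + part.length + 1)) (res, pos)).1 = res ++ pvBfold parts pos := by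
  induction parts with
  | nil => intro res pos; simp [pvBfold]
  | cons p ps ih =>
    intro res pos
    simp only [List.foldl_cons, pvBfold]
    rw [ih]
    split <;> simp

-- A's loop, recursive form with final flush
def pvAloop : List Char → Int → (List (Int × String) × List Char × Int) → List (Int × String)
  | [], _, (enc, cur, cs) => if cur ≠ [] then enc ++ [(cs, String.ofList cur)] else enc
  | c :: l, i, st => pvAloop l (i + 1) (pvAStep st (i, c))

theorem aloop_eq_bfold (l : List Char) :
    ∀ (i : Int) (enc : List (Int × String)) (cur : List Char) (cs : Int),
      pvAloop l i (enc, cur, cs) =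
        enc ++ (if cur = [] then pvBfold (pvSplit l) i
                else (cs, String.ofList ((pvSplit l).head!.reverse ++ cur)) ::
                     pvBfold (pvSplit l).tail (i + (pvSplit l).head!.length + 1)) := by
  induction l with
  | nil =>
    intro i enc cur cs
    rcases cur with _ | ⟨c, cur'⟩ <;> simp [pvAloop, pvSplit, pvBfold]
  | cons c l ih =>
    intro i enc cur cs
    by_cases hc : c = '-'
    · subst hc
      rcases cur with _ | ⟨d, cur'⟩
      · simp only [pvAloop, pvAStep]
        rw [ih]
        simp [pvSplit, pvBfold]
      · simp only [pvAloop, pvAStep]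
        simp only [ne_eq, reduceCtorEq, not_false_eq_true, if_pos]
        rw [ih]
        simp [pvSplit, pvBfold]
    · rcases cur with _ | ⟨d, cur'⟩
      · simp only [pvAloop, pvAStep, if_neg hc]
        simp only [ne_eq, not_true_eq_false, ite_false]
        rw [ih]
        rcases hs : pvSplit l with _ | ⟨h1, t1⟩
        · exact absurd hs (pvSplit_ne_nil l)
        · simp [pvSplit, if_neg hc, hs, pvBfold]
          ring_nf
      · simp only [pvAloop, pvAStep, if_neg hc]
        simp only [ne_eq, reduceCtorEq, not_false_eq_true, if_pos]
        rw [ih]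
        rcases hs : pvSplit l with _ | ⟨h1, t1⟩
        · exact absurd hs (pvSplit_ne_nil l)
        · simp [pvSplit, if_neg hc, hs, pvBfold]
          ring_nf

theorem foldl_enum_eq_aloop (l : List Char) :
    ∀ (i : Int) (st : List (Int × String) × List Char × Int),
      (if ((PySem.List.enumerate l i).foldl pvAStep st).2.1 ≠ [] then
        ((PySem.List.enumerate l i).foldl pvAStep st).1 ++
          [(((PySem.List.enumerate l i).foldl pvAStep st).2.2,
            String.ofList ((PySem.List.enumerate l i).foldl pvAStep st).2.1)]
       else ((PySem.List.enumerate l i).foldl pvAStep st).1)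
      = pvAloop l i st := by
  induction l with
  | nil =>
    intro i st
    rcases st with ⟨enc, cur, cs⟩
    simp [PySem.List.enumerate, pvAloop]
  | cons c l ih =>
    intro i st
    have he : PySem.List.enumerate (c :: l) i = (i, c) :: PySem.List.enumerate l (i + 1) := by
      simp [PySem.List.enumerate]
    rw [he]
    simp only [List.foldl_cons, pvAloop]
    exact ih (i + 1) (pvAStep st (i, c))

-- ===== VERDICT (by name: the statement is the Claim_ definition above) =====
theorem split_encoding_str_spec : Claim_equal_split_encoding_str := by
  intro encoding _
  unfold Spec_split_encoding_str split_encoding_str split_encoding_str_alt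
  simp only [splitOn_eq_pvSplit]
  rw [bfold_foldl, foldl_enum_eq_aloop, aloop_eq_bfold]
  simp
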